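-- pv_equiv track=rewrite | github.com/Toovil/Ticademia-UNAL-2022-1 | Soluciones/M9/5.py | panvocalica
-- ===== SOURCE A (Python) =====
-- def panvocalica(palabra):
--     vocales = ["a", "e", "i", "o", "u"]
--     lista_comprueba = []
--     for i in vocales:
--         for vocal in palabra:
--             if vocal not in lista_comprueba:
--                 if i == vocal:
--                     lista_comprueba.append(vocal)
--     if len(lista_comprueba) == len(vocales):
--         return "Panvocalica"
--     else:
--         return "No es panvocalica"
-- ===== SOURCE B (Python) =====
-- def panvocalica(palabra):
--     chars = set(palabra)
--     if set("aeiou").issubset(chars):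
--         return "Panvocalica"
--     else:
--         return "No es panvocalica"
-- ===== Notes on version B (the rewrite author's own statement) =====
-- stated objective: simpler
-- what changed: Replaces the nested 5xn loop with its seen-list accumulator and length-count test by a single set construction over the word and one subset test against the five vowels.
import Mathlib
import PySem

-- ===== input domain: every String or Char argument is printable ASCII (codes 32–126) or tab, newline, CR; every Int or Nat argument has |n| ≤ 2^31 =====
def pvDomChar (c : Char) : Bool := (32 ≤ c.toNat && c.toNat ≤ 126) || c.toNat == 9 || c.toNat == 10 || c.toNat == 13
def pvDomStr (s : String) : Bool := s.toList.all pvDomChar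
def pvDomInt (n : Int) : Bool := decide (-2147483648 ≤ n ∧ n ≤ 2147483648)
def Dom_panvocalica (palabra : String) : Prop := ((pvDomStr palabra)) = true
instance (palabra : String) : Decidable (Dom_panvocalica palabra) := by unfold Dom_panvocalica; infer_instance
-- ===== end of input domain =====

-- B replaces A's nested 5×n loop with seen-list accumulator by one set build plus a subset test (simpler).

-- ===== PORT A =====
-- inner 'for vocal in palabra' body, for the current outer vowel i
def pvStepA (i : Char) (lista : List Char) (vocal : Char) : List Char :=
  if ¬ lista.contains vocal then
    (if i == vocal then lista ++ [vocal] else lista)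
  else lista

def panvocalica (palabra : String) : String :=
  let vocales : List Char := ['a', 'e', 'i', 'o', 'u']
  let lista_comprueba : List Char :=
    vocales.foldl (fun lista i => palabra.toList.foldl (pvStepA i) lista) []
  if lista_comprueba.length = vocales.length then "Panvocalica"
  else "No es panvocalica"

-- ===== PORT B =====
def panvocalica_alt (palabra : String) : String :=
  let chars : PySem.Set Char := PySem.Set.ofList palabra.toList
  if PySem.Set.issubset (PySem.Set.ofList "aeiou".toList) chars then "Panvocalica"
  else "No es panvocalica"

-- ===== PRECONDITION & SPEC =====
def Spec_panvocalica (palabra : String) (out : String) : Prop := out = panvocalica_alt palabra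
instance (palabra : String) (out : String) : Decidable (Spec_panvocalica palabra out) := by unfold Spec_panvocalica; infer_instance

-- ===== CLAIM (what is proved, stated in full; the proofs are below) =====
def Claim_equal_panvocalica : Prop := ∀ (palabra : String), Dom_panvocalica palabra → Spec_panvocalica palabra (panvocalica palabra)

-- ===== LEMMAS AND PROOFS =====

-- once the current vowel i is already in lista, the inner loop changes nothing
theorem pv_inner_done (i : Char) (l : List Char) (acc : List Char)
    (h : acc.contains i = true) : l.foldl (pvStepA i) acc = acc := by
  induction l with
  | nil => rfl
  | cons c rest ih =>
    have hstep : pvStepA i acc c = acc := by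
      unfold pvStepA
      split_ifs with h1 h2
      · rfl
      · exact absurd ((by simpa using h2 : i = c) ▸ h) h1
      · rfl
    simpa [List.foldl, hstep] using ih

-- inner loop appends i exactly when i occurs in l (and was not yet seen)
theorem pv_inner (i : Char) (l : List Char) (acc : List Char)
    (h : acc.contains i = false) :
    l.foldl (pvStepA i) acc = if l.contains i then acc ++ [i] else acc := by
  induction l with
  | nil => simp
  | cons c rest ih =>
    by_cases hic : i = c
    · subst hic
      have hstep : pvStepA i acc i = acc ++ [i] := by
        unfold pvStepA
        have hna : i ∉ acc := by simpa [List.contains_eq_mem] using h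
        simp [List.contains_eq_mem, hna]
      have : rest.foldl (pvStepA i) (acc ++ [i]) = acc ++ [i] := by
        apply pv_inner_done
        simp [List.contains_eq_mem]
      simp [List.foldl, hstep, this, List.contains_eq_mem]
    · have hstep : pvStepA i acc c = acc := by
        unfold pvStepA
        split_ifs with h1 h2
        · rfl
        · exact absurd (by simpa using h2) hic
        · rfl
      simp [List.foldl, hstep, ih, List.contains_eq_mem, hic]

-- outer loop: folding the inner loop over distinct vowels none of which is seen yet
theorem pv_outer (l : List Char) (vs : List Char) (acc : List Char)
    (h : ∀ v ∈ vs, acc.contains v = false) (hnd : vs.Nodup) :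
    vs.foldl (fun acc i => l.foldl (pvStepA i) acc) acc
      = acc ++ vs.filter l.contains := by
  induction vs generalizing acc with
  | nil => simp
  | cons v rest ih =>
    have hv : acc.contains v = false := h v (by simp)
    have hstep := pv_inner v l acc hv
    have hrest : ∀ w ∈ rest, (if l.contains v then acc ++ [v] else acc).contains w = false := by
      intro w hw
      have hwv : w ≠ v := by
        rintro rfl; exact (List.nodup_cons.mp hnd).1 hw
      have := h w (by simp [hw])
      by_cases hl : l.contains v <;>
        simp_all [List.contains_eq_mem]
    have hnd' : rest.Nodup := (List.nodup_cons.mp hnd).2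
    simp only [List.foldl, hstep]
    rw [ih _ hrest hnd']
    by_cases hl : v ∈ l <;> simp [hl, List.contains_eq_mem]

-- ===== VERDICT (by name: the statement is the Claim_ definition above) =====
theorem panvocalica_spec : Claim_equal_panvocalica := by
  intro palabra _
  simp only [Spec_panvocalica, panvocalica, panvocalica_alt]
  rw [pv_outer palabra.toList ['a','e','i','o','u'] [] (fun v _ => rfl) (by simp)]
  simp only [List.nil_append]
  by_cases hall : ∀ v ∈ (['a','e','i','o','u'] : List Char), palabra.toList.contains v
  · have hlen : ((['a','e','i','o','u'] : List Char).filter palabra.toList.contains).length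
        = (['a','e','i','o','u'] : List Char).length :=
      List.length_filter_eq_length_iff.mpr hall
    have hm : ∀ v ∈ (['a','e','i','o','u'] : List Char), v ∈ palabra.toList := by
      intro v hv
      simpa [List.contains_eq_mem] using hall v hv
    simp only [hlen]
    simp
    exact ⟨hm 'a' (by simp), hm 'e' (by simp), hm 'i' (by simp),
           hm 'o' (by simp), hm 'u' (by simp)⟩
  · have hlen : ((['a','e','i','o','u'] : List Char).filter palabra.toList.contains).length
        ≠ (['a','e','i','o','u'] : List Char).length := by
      intro hc; exact hall (List.length_filter_eq_length_iff.mp hc)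
    have hconj : ¬ ('a' ∈ palabra.toList ∧ 'e' ∈ palabra.toList ∧ 'i' ∈ palabra.toList ∧
        'o' ∈ palabra.toList ∧ 'u' ∈ palabra.toList) := by
      rintro ⟨h1, h2, h3, h4, h5⟩
      apply hall
      intro v hv
      fin_cases hv <;> simp [List.contains_eq_mem, h1, h2, h3, h4, h5]
    have hlen5 : ((['a','e','i','o','u'] : List Char).filter palabra.toList.contains).length ≠ 5 := by
      simpa using hlen
    simp [hlen5, hconj]
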